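-- pv_equiv track=rewrite | github.com/Jarno0110/chess-ai | reinforcement_learning_v1.py | board_string_to_int_array
-- ===== SOURCE A (Python) =====
-- def board_string_to_int_array(board):
--     int_array = []
--     int_array_e = [0, 0, 0, 0, 0, 0, 0, 0, 0, 0, 0, 0]
--     int_array_p = [1,0,0,0,0,0,0,0,0,0,0,0]
--     int_array_r = [0,1,0,0,0,0,0,0,0,0,0,0]
--     int_array_n = [0,0,1,0,0,0,0,0,0,0,0,0]
--     int_array_b = [0,0,0,1,0,0,0,0,0,0,0,0]
--     int_array_k = [0,0,0,0,1,0,0,0,0,0,0,0]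
--     int_array_q = [0,0,0,0,0,1,0,0,0,0,0,0]
--     int_array_P = [0,0,0,0,0,0,1,0,0,0,0,0]
--     int_array_R = [0,0,0,0,0,0,0,1,0,0,0,0]
--     int_array_N = [0,0,0,0,0,0,0,0,1,0,0,0]
--     int_array_B = [0,0,0,0,0,0,0,0,0,1,0,0]
--     int_array_K = [0,0,0,0,0,0,0,0,0,0,1,0]
--     int_array_Q = [0,0,0,0,0,0,0,0,0,0,0,1]
--     for x in board:
--         if(x == "p"):
--             int_array.append(int_array_p)
--         if (x == "n"):
--             int_array.append(int_array_n)
--         if (x == "b"):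
--             int_array.append(int_array_b)
--         if (x == "r"):
--             int_array.append(int_array_r)
--         if (x == "k"):
--             int_array.append(int_array_k)
--         if (x == "q"):
--             int_array.append(int_array_q)
--         if (x == "P"):
--             int_array.append(int_array_P)
--         if (x == "N"):
--             int_array.append(int_array_N)
--         if (x == "B"):
--             int_array.append(int_array_B)
--         if (x == "Q"):
--             int_array.append(int_array_Q)
--         if (x == "K"):
--             int_array.append(int_array_K)
--         if (x == "R"):
--             int_array.append(int_array_R)
--         if (x == "."):
--             int_array.append(int_array_e)
--     return int_array
-- ===== SOURCE B (Python) =====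
-- def board_string_to_int_array(board):
--     order = "prnbkqPRNBKQ"
--     # stage 1: keep only recognised cells
--     cells = [x for x in board if x in order or x == "."]
--     # stage 2: build the 12 one-hot COLUMNS of the result matrix
--     columns = [[1 if x == p else 0 for x in cells] for p in order]
--     # stage 3: transpose columns into rows
--     return [[col[i] for col in columns] for i in range(len(cells))]
-- ===== Notes on version B (the rewrite author's own statement) =====
-- stated objective: alternative
-- what changed: Instead of A's per-character 13-branch cascade appending precomputed rows in one pass, B stages the work: it first filters the board to recognised cells, then builds the twelve one-hot COLUMNS of the result matrix (one pass per piece letter), and finally transposes the columns into rows by index.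
import Mathlib
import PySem

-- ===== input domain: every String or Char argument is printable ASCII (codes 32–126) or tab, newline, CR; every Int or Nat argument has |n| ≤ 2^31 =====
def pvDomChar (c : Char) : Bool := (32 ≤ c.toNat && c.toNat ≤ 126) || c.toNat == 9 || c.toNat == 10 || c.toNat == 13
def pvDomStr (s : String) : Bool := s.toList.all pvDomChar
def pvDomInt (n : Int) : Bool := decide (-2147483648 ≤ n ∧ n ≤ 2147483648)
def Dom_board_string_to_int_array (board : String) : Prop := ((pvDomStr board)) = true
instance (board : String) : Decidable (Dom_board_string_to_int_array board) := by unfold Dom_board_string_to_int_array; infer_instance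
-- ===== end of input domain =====

-- B replaces A's single-pass 13-branch if-cascade by a staged column-wise construction:
-- filter the board to recognised cells, build the 12 one-hot columns, transpose into rows (objective: alternative).

-- ===== PORT A =====
def board_string_to_int_array (board : String) : List (List Int) :=
  let int_array_e : List Int := [0,0,0,0,0,0,0,0,0,0,0,0]
  let int_array_p : List Int := [1,0,0,0,0,0,0,0,0,0,0,0]
  let int_array_r : List Int := [0,1,0,0,0,0,0,0,0,0,0,0]
  let int_array_n : List Int := [0,0,1,0,0,0,0,0,0,0,0,0]
  let int_array_b : List Int := [0,0,0,1,0,0,0,0,0,0,0,0]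
  let int_array_k : List Int := [0,0,0,0,1,0,0,0,0,0,0,0]
  let int_array_q : List Int := [0,0,0,0,0,1,0,0,0,0,0,0]
  let int_array_P : List Int := [0,0,0,0,0,0,1,0,0,0,0,0]
  let int_array_R : List Int := [0,0,0,0,0,0,0,1,0,0,0,0]
  let int_array_N : List Int := [0,0,0,0,0,0,0,0,1,0,0,0]
  let int_array_B : List Int := [0,0,0,0,0,0,0,0,0,1,0,0]
  let int_array_K : List Int := [0,0,0,0,0,0,0,0,0,0,1,0]
  let int_array_Q : List Int := [0,0,0,0,0,0,0,0,0,0,0,1]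
  board.toList.foldl (fun int_array x =>
    let int_array := if x = 'p' then int_array ++ [int_array_p] else int_array
    let int_array := if x = 'n' then int_array ++ [int_array_n] else int_array
    let int_array := if x = 'b' then int_array ++ [int_array_b] else int_array
    let int_array := if x = 'r' then int_array ++ [int_array_r] else int_array
    let int_array := if x = 'k' then int_array ++ [int_array_k] else int_array
    let int_array := if x = 'q' then int_array ++ [int_array_q] else int_array
    let int_array := if x = 'P' then int_array ++ [int_array_P] else int_array
    let int_array := if x = 'N' then int_array ++ [int_array_N] else int_array
    let int_array := if x = 'B' then int_array ++ [int_array_B] else int_array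
    let int_array := if x = 'Q' then int_array ++ [int_array_Q] else int_array
    let int_array := if x = 'K' then int_array ++ [int_array_K] else int_array
    let int_array := if x = 'R' then int_array ++ [int_array_R] else int_array
    let int_array := if x = '.' then int_array ++ [int_array_e] else int_array
    int_array) []

-- ===== PORT B =====
-- 'x in order' on the single-char x equals list membership; col[i] is always in range
-- (every column has length cells.length), so getD's default is never used.
def board_string_to_int_array_alt (board : String) : List (List Int) :=
  let order : List Char := ("prnbkqPRNBKQ" : String).toList
  let cells : List Char := board.toList.filter (fun x => decide (x ∈ order) || x == '.')
  let columns : List (List Int) :=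
    order.map (fun p => cells.map (fun x => if x == p then (1 : Int) else 0))
  (List.range cells.length).map (fun i => columns.map (fun col => col.getD i 0))

-- ===== PRECONDITION & SPEC =====
def Spec_board_string_to_int_array (board : String) (out : List (List Int)) : Prop := out = board_string_to_int_array_alt board
instance (board : String) (out : List (List Int)) : Decidable (Spec_board_string_to_int_array board out) := by unfold Spec_board_string_to_int_array; infer_instance

-- ===== CLAIM (what is proved, stated in full; the proofs are below) =====
def Claim_equal_board_string_to_int_array : Prop := ∀ (board : String), Dom_board_string_to_int_array board → Spec_board_string_to_int_array board (board_string_to_int_array board)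

-- ===== LEMMAS AND PROOFS =====

def pvOrder : List Char := ("prnbkqPRNBKQ" : String).toList

def pvPred (x : Char) : Bool := decide (x ∈ pvOrder) || x == '.'

def pvRow (x : Char) : List Int := pvOrder.map (fun p => if x == p then (1 : Int) else 0)

-- A's loop body, factored for the proof
def pvStepA (int_array : List (List Int)) (x : Char) : List (List Int) :=
  let int_array := if x = 'p' then int_array ++ [[1,0,0,0,0,0,0,0,0,0,0,0]] else int_array
  let int_array := if x = 'n' then int_array ++ [[0,0,1,0,0,0,0,0,0,0,0,0]] else int_array
  let int_array := if x = 'b' then int_array ++ [[0,0,0,1,0,0,0,0,0,0,0,0]] else int_array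
  let int_array := if x = 'r' then int_array ++ [[0,1,0,0,0,0,0,0,0,0,0,0]] else int_array
  let int_array := if x = 'k' then int_array ++ [[0,0,0,0,1,0,0,0,0,0,0,0]] else int_array
  let int_array := if x = 'q' then int_array ++ [[0,0,0,0,0,1,0,0,0,0,0,0]] else int_array
  let int_array := if x = 'P' then int_array ++ [[0,0,0,0,0,0,1,0,0,0,0,0]] else int_array
  let int_array := if x = 'N' then int_array ++ [[0,0,0,0,0,0,0,0,1,0,0,0]] else int_array
  let int_array := if x = 'B' then int_array ++ [[0,0,0,0,0,0,0,0,0,1,0,0]] else int_array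
  let int_array := if x = 'Q' then int_array ++ [[0,0,0,0,0,0,0,0,0,0,0,1]] else int_array
  let int_array := if x = 'K' then int_array ++ [[0,0,0,0,0,0,0,0,0,0,1,0]] else int_array
  let int_array := if x = 'R' then int_array ++ [[0,0,0,0,0,0,0,1,0,0,0,0]] else int_array
  let int_array := if x = '.' then int_array ++ [[0,0,0,0,0,0,0,0,0,0,0,0]] else int_array
  int_array

-- A's step appends pvRow x exactly on recognised characters
theorem pvStepA_eq (acc : List (List Int)) (x : Char) :
    pvStepA acc x = acc ++ (if pvPred x then [pvRow x] else []) := by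
  by_cases hp : x = 'p'; · subst hp; simp [pvStepA, pvPred, pvRow, pvOrder]
  by_cases hn : x = 'n'; · subst hn; simp [pvStepA, pvPred, pvRow, pvOrder]
  by_cases hb : x = 'b'; · subst hb; simp [pvStepA, pvPred, pvRow, pvOrder]
  by_cases hr : x = 'r'; · subst hr; simp [pvStepA, pvPred, pvRow, pvOrder]
  by_cases hk : x = 'k'; · subst hk; simp [pvStepA, pvPred, pvRow, pvOrder]
  by_cases hq : x = 'q'; · subst hq; simp [pvStepA, pvPred, pvRow, pvOrder]
  by_cases hP : x = 'P'; · subst hP; simp [pvStepA, pvPred, pvRow, pvOrder]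
  by_cases hN : x = 'N'; · subst hN; simp [pvStepA, pvPred, pvRow, pvOrder]
  by_cases hB : x = 'B'; · subst hB; simp [pvStepA, pvPred, pvRow, pvOrder]
  by_cases hQ : x = 'Q'; · subst hQ; simp [pvStepA, pvPred, pvRow, pvOrder]
  by_cases hK : x = 'K'; · subst hK; simp [pvStepA, pvPred, pvRow, pvOrder]
  by_cases hR : x = 'R'; · subst hR; simp [pvStepA, pvPred, pvRow, pvOrder]
  by_cases hd : x = '.'
  · subst hd; simp [pvStepA, pvPred, pvRow, pvOrder]
  · have hpred : pvPred x = false := by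
      simp [pvPred, pvOrder, hp, hn, hb, hr, hk, hq, hP, hN, hB, hQ, hK, hR, hd]
    simp [pvStepA, hp, hn, hb, hr, hk, hq, hP, hN, hB, hQ, hK, hR, hd, hpred]

theorem pvFoldA_eq (l : List Char) (acc : List (List Int)) :
    l.foldl pvStepA acc = acc ++ (l.filter pvPred).map pvRow := by
  induction l generalizing acc with
  | nil => simp
  | cons x xs ih =>
    simp only [List.foldl_cons, List.filter_cons]
    rw [ih, pvStepA_eq]
    by_cases h : pvPred x = true <;> simp [h]

-- transposing the column matrix yields exactly the per-cell rows
theorem pvTranspose_eq (cells : List Char) :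
    (List.range cells.length).map (fun i =>
        (pvOrder.map (fun p => cells.map (fun x => if x == p then (1 : Int) else 0))).map
          (fun col => col.getD i 0))
      = cells.map pvRow := by
  apply List.ext_getElem
  · simp
  · intro i h1 h2
    simp only [List.getElem_map, List.getElem_range, List.map_map]
    have hi : i < cells.length := by simpa using h2
    simp [pvRow, List.getElem?_eq_getElem hi]

-- ===== VERDICT (by name: the statement is the Claim_ definition above) =====
theorem board_string_to_int_array_spec : Claim_equal_board_string_to_int_array := by
  intro board _
  show _ = _
  have hA : board_string_to_int_array board = board.toList.foldl pvStepA [] := rfl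
  have hB : board_string_to_int_array_alt board
      = (List.range (board.toList.filter pvPred).length).map (fun i =>
          (pvOrder.map (fun p =>
            (board.toList.filter pvPred).map (fun x => if x == p then (1 : Int) else 0))).map
            (fun col => col.getD i 0)) := rfl
  rw [hA, hB, pvFoldA_eq, pvTranspose_eq]
  simp
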